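-- pv_equiv track=rewrite | github.com/Terry-LT/discrete-math-code-from-book | ex_page15/ex1.1.py | search_min_value
-- ===== SOURCE A (Python) =====
-- def search_min_value(arr):
--     min_val = 0
--     for i in arr:
--         if min_val == 0 and i != 0:
--             min_val = i
--         else:
--             if min_val > i and i != 0:
--                 min_val = i
--     return min_val
-- ===== SOURCE B (Python) =====
-- def search_min_value(arr):
--     nz = [i for i in arr if i != 0]
--     return min(nz) if nz else 0
-- ===== Notes on version B (the rewrite author's own statement) =====
-- stated objective: simpler
-- what changed: Replaces A's fused single-pass loop with branch-tracked state by a two-pass filter-then-min decomposition (select nonzero candidates, then one library reduction), keeping 0 for the empty/all-zero case.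
import Mathlib
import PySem

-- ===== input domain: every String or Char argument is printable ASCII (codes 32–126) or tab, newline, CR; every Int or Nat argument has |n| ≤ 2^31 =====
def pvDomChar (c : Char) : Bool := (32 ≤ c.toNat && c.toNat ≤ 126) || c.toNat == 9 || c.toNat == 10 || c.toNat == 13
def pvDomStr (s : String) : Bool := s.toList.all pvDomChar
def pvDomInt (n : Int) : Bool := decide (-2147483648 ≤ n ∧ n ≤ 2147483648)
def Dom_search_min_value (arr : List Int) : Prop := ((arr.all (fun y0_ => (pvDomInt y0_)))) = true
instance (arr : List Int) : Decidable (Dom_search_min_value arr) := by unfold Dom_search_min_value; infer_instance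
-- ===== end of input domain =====

-- B replaces A's fused single-pass filter-and-track loop by a two-pass filter-then-min decomposition (simpler); return values proved equal.


-- ===== PORT A =====
-- loop body of A, as a named helper
def pyStepA (min_val i : Int) : Int :=
  if min_val = 0 ∧ i ≠ 0 then i
  else if min_val > i ∧ i ≠ 0 then i
  else min_val

def search_min_value (arr : List Int) : Int :=
  arr.foldl pyStepA 0

-- ===== PORT B =====
def search_min_value_alt (arr : List Int) : Int :=
  let nz := arr.filter (fun i => i ≠ 0)
  if nz ≠ [] then ((PySem.List.min? nz (fun x => x)).getD 0) else 0

-- ===== PRECONDITION & SPEC =====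
def Spec_search_min_value (arr : List Int) (out : Int) : Prop := out = search_min_value_alt arr
instance (arr : List Int) (out : Int) : Decidable (Spec_search_min_value arr out) := by unfold Spec_search_min_value; infer_instance

-- ===== CLAIM (what is proved, stated in full; the proofs are below) =====
def Claim_equal_search_min_value : Prop := ∀ (arr : List Int), Dom_search_min_value arr → Spec_search_min_value arr (search_min_value arr)

-- ===== LEMMAS AND PROOFS =====
theorem stepA_zero (m : Int) : pyStepA m 0 = m := by
  simp [pyStepA]

theorem stepA_min (m i : Int) (hm : m ≠ 0) (hi : i ≠ 0) : pyStepA m i = min m i := by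
  simp only [pyStepA, min_def]
  split_ifs <;> omega

-- with a nonzero accumulator, A's loop is a running min over the nonzero elements
theorem foldA_nonzero (t : List Int) : ∀ m : Int, m ≠ 0 →
    t.foldl pyStepA m = (t.filter (fun i => i ≠ 0)).foldl min m := by
  induction t with
  | nil => intro m _; rfl
  | cons i t ih =>
    intro m hm
    by_cases hi : i = 0
    · subst hi
      simp only [List.foldl, List.filter_cons, stepA_zero]
      simpa using ih m hm
    · have hmin : min m i ≠ 0 := by
        rcases min_cases m i with ⟨h, _⟩ | ⟨h, _⟩ <;> rw [h] <;> assumption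
      simp only [List.filter_cons]
      rw [if_pos (by simp [hi])]
      simp only [List.foldl, stepA_min m i hm hi]
      exact ih (min m i) hmin

theorem search_min_value_eq (arr : List Int) :
    search_min_value arr = search_min_value_alt arr := by
  induction arr with
  | nil => rfl
  | cons i t ih =>
    by_cases hi : i = 0
    · subst hi
      simp only [search_min_value, search_min_value_alt, List.foldl, List.filter_cons,
        stepA_zero] at *
      simpa using ih
    · have h0 : pyStepA 0 i = i := by simp [pyStepA, hi]
      simp only [search_min_value, search_min_value_alt, List.foldl, List.filter_cons,
        h0, foldA_nonzero t i hi]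
      rw [if_pos (by simp [hi]), if_pos (by simp [hi])]
      simp [PySem.List.min?_id_cons]

-- ===== VERDICT (by name: the statement is the Claim_ definition above) =====
theorem search_min_value_spec : Claim_equal_search_min_value := by
  intro arr _
  exact search_min_value_eq arr
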